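-- pv_equiv track=rewrite | github.com/Neverous/team | DEADLINE24/2015/match.py | available
-- ===== SOURCE A (Python) =====
-- def available(field, shape, H, W, house=True):
--     gain = 0
--     for h, row in enumerate(shape):
--         for w, cell in enumerate(row):
--             if H + h < 0 or W + w < 0:
--                 return None
--
--             if H + h >= len(field) or W + w >= len(field[H + h]):
--                 return None
--
--             if cell and field[H + h][W + w] in ('#', 'H', 'G'):
--                 return None
--
--             if cell and field[H + h][W + w] == 'X':
--                 gain += (house and -1 or 1) * 2
--
--             if house:
--                 if cell and H + h - 1 >= 0 and field[H + h - 1][W + w] == 'H':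
--                     gain -= 1
--
--                 if cell and H + h + 1 < len(field) and field[H + h + 1][W + w] == 'H':
--                     gain -= 1
--
--                 if cell and W + w - 1 >= 0 and field[H + h][W + w - 1] == 'H':
--                     gain -= 1
--
--                 if cell and W + w + 1 < len(field[H + h]) and field[H + h][W + w + 1] == 'H':
--                     gain -= 1
--
--     return gain
-- ===== SOURCE B (Python) =====
-- def available(field, shape, H, W, house=True):
--     # Precompute a per-field-cell score table once: standing bonus for 'X'
--     # plus -1 for each adjacent 'H' (houses only); then the placement loop
--     # only does bounds/collision checks and table lookups.
--     n = len(field)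
--     score = []
--     for r, frow in enumerate(field):
--         srow = []
--         for c, ch in enumerate(frow):
--             s = (-2 if house else 2) if ch == 'X' else 0
--             if house:
--                 if r > 0 and c < len(field[r - 1]) and field[r - 1][c] == 'H':
--                     s -= 1
--                 if r + 1 < n and c < len(field[r + 1]) and field[r + 1][c] == 'H':
--                     s -= 1
--                 if c > 0 and frow[c - 1] == 'H':
--                     s -= 1
--                 if c + 1 < len(frow) and frow[c + 1] == 'H':
--                     s -= 1
--             srow.append(s)
--         score.append(srow)
--     gain = 0
--     for h, row in enumerate(shape):
--         for w, cell in enumerate(row):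
--             r, c = H + h, W + w
--             if r < 0 or c < 0 or r >= n or c >= len(field[r]):
--                 return None
--             if cell:
--                 if field[r][c] in ('#', 'H', 'G'):
--                     return None
--                 gain += score[r][c]
--     return gain
-- ===== Notes on version B (the rewrite author's own statement) =====
-- stated objective: alternative
-- what changed: B precomputes a score table over the whole field in one pass (X bonus plus adjacent-'H' penalties per field cell), so the placement loop over the shape does only bounds/collision checks and a single table lookup per filled cell, instead of A's per-shape-cell unrolled neighbor probing.
-- outside the precondition, e.g. on available([['#', '.'], ['.']], [[1, 1]], 0, 0, True): A returns None, B returns None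
import Mathlib
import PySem

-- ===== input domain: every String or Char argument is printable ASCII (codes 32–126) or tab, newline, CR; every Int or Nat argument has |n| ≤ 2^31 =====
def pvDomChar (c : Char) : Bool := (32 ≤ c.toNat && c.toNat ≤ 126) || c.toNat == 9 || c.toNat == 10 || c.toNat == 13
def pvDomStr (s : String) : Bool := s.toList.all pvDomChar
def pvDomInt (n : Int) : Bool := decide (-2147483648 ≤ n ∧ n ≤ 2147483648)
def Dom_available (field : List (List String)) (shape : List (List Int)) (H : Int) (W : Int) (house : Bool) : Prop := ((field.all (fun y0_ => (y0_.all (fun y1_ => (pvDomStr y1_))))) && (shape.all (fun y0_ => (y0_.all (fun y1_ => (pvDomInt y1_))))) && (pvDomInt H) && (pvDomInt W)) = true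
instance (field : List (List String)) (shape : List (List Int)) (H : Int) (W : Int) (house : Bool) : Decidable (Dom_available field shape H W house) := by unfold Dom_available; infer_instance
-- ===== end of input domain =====

-- B precomputes a per-field-cell score table (X bonus plus adjacent-'H' penalties) in one pass over
-- the FIELD, so the placement loop does only bounds/collision checks and table lookups; objective: alternative.

-- shared accessors for `field[r][c]` and `len(field[r])` (exact under the guards both Pythons place before them)
def pvCellAt (field : List (List String)) (r c : Int) : Option String :=
  (PySem.List.pyGet? field r).bind (fun row => PySem.List.pyGet? row c)

def pvRowLen (field : List (List String)) (r : Int) : Int :=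
  (((PySem.List.pyGet? field r).getD []).length : Int)

-- ===== PORT A =====
-- one iteration of A's inner loop body at absolute position (r, c) carrying gain g; `none` = `return None`
def availStep (field : List (List String)) (house : Bool) (r c : Int) (cell : Int) (g : Int) : Option Int :=
  if r < 0 ∨ c < 0 then none
  else if (field.length : Int) ≤ r ∨ pvRowLen field r ≤ c then none
  else if cell ≠ 0 ∧ (pvCellAt field r c = some "#" ∨ pvCellAt field r c = some "H" ∨ pvCellAt field r c = some "G") then none
  else
    let g1 := if cell ≠ 0 ∧ pvCellAt field r c = some "X" then g + (if house then -1 else 1) * 2 else g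
    if house then
      let g2 := if cell ≠ 0 ∧ 0 ≤ r - 1 ∧ pvCellAt field (r - 1) c = some "H" then g1 - 1 else g1
      let g3 := if cell ≠ 0 ∧ r + 1 < (field.length : Int) ∧ pvCellAt field (r + 1) c = some "H" then g2 - 1 else g2
      let g4 := if cell ≠ 0 ∧ 0 ≤ c - 1 ∧ pvCellAt field r (c - 1) = some "H" then g3 - 1 else g3
      let g5 := if cell ≠ 0 ∧ c + 1 < pvRowLen field r ∧ pvCellAt field r (c + 1) = some "H" then g4 - 1 else g4
      some g5
    else some g1

def available (field : List (List String)) (shape : List (List Int)) (H : Int) (W : Int) (house : Bool) : Option Int :=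
  (PySem.List.enumerate shape 0).foldl (fun acc hw =>
    (PySem.List.enumerate hw.2 0).foldl (fun acc2 wc =>
      acc2.bind (fun g => availStep field house (H + hw.1) (W + wc.1) wc.2 g)) acc) (some 0)

-- ===== PORT B =====
-- score of one field cell (r, c) holding string ch; `frow[c±1]` of Source B is `field[r][c±1]` since frow = field[r]
def scoreCell (field : List (List String)) (house : Bool) (r c : Int) (ch : String) : Int :=
  let s0 := if ch = "X" then (if house then -2 else 2) else 0
  if house then
    let s1 := if 0 < r ∧ c < pvRowLen field (r - 1) ∧ pvCellAt field (r - 1) c = some "H" then s0 - 1 else s0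
    let s2 := if r + 1 < (field.length : Int) ∧ c < pvRowLen field (r + 1) ∧ pvCellAt field (r + 1) c = some "H" then s1 - 1 else s1
    let s3 := if 0 < c ∧ pvCellAt field r (c - 1) = some "H" then s2 - 1 else s2
    if c + 1 < pvRowLen field r ∧ pvCellAt field r (c + 1) = some "H" then s3 - 1 else s3
  else s0

def scoreTable (field : List (List String)) (house : Bool) : List (List Int) :=
  (PySem.List.enumerate field 0).map (fun rr =>
    (PySem.List.enumerate rr.2 0).map (fun cc => scoreCell field house rr.1 cc.1 cc.2))

-- `score[r][c]` under Source B's in-bounds guard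
def pvScoreAt (score : List (List Int)) (r c : Int) : Int :=
  (PySem.List.pyGet? ((PySem.List.pyGet? score r).getD []) c).getD 0

-- one iteration of Source B's placement loop body
def altStep (field : List (List String)) (score : List (List Int)) (r c : Int) (cell : Int) (g : Int) : Option Int :=
  if r < 0 ∨ c < 0 ∨ (field.length : Int) ≤ r ∨ pvRowLen field r ≤ c then none
  else if cell ≠ 0 then
    if pvCellAt field r c = some "#" ∨ pvCellAt field r c = some "H" ∨ pvCellAt field r c = some "G" then none
    else some (g + pvScoreAt score r c)
  else some g

def available_alt (field : List (List String)) (shape : List (List Int)) (H : Int) (W : Int) (house : Bool) : Option Int :=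
  let score := scoreTable field house
  (PySem.List.enumerate shape 0).foldl (fun acc hw =>
    (PySem.List.enumerate hw.2 0).foldl (fun acc2 wc =>
      acc2.bind (fun g => altStep field score (H + hw.1) (W + wc.1) wc.2 g)) acc) (some 0)

-- ===== PRECONDITION & SPEC =====
-- Pre_ excludes inputs where a house-neighbor lookup hits a ragged row shorter than the cell's column
-- (IndexError in Python A); it is stated over all filled in-bounds cells, so it also conservatively excludes
-- some inputs where an earlier `return None` preempts that IndexError and A returns None (B returns None too).
def Pre_available (field : List (List String)) (shape : List (List Int)) (H : Int) (W : Int) (house : Bool) : Prop :=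
  house = true →
  ∀ h ∈ List.range shape.length, ∀ w ∈ List.range (shape.getD h []).length,
    (shape.getD h []).getD w 0 ≠ 0 →
    0 ≤ H + (h : Int) → 0 ≤ W + (w : Int) → H + (h : Int) < (field.length : Int) →
    W + (w : Int) < ((field.getD (H + (h : Int)).toNat []).length : Int) →
      (0 ≤ H + (h : Int) - 1 → W + (w : Int) < ((field.getD ((H + (h : Int)).toNat - 1) []).length : Int)) ∧
      (H + (h : Int) + 1 < (field.length : Int) → W + (w : Int) < ((field.getD ((H + (h : Int)).toNat + 1) []).length : Int))
instance (field : List (List String)) (shape : List (List Int)) (H : Int) (W : Int) (house : Bool) : Decidable (Pre_available field shape H W house) := by unfold Pre_available; infer_instance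

def pvWitness_available : List (List String) × List (List Int) × Int × Int × Bool :=
  ([[".", "."], [".", "H"]], [[1]], 0, 0, true)

def Spec_available (field : List (List String)) (shape : List (List Int)) (H : Int) (W : Int) (house : Bool) (out : Option Int) : Prop := out = available_alt field shape H W house
instance (field : List (List String)) (shape : List (List Int)) (H : Int) (W : Int) (house : Bool) (out : Option Int) : Decidable (Spec_available field shape H W house out) := by unfold Spec_available; infer_instance

-- ===== CLAIM (what is proved, stated in full; the proofs are below) =====
def Claim_equal_available : Prop := ∀ (field : List (List String)) (shape : List (List Int)) (H : Int) (W : Int) (house : Bool), Dom_available field shape H W house → Pre_available field shape H W house → Spec_available field shape H W house (available field shape H W house)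

-- ===== LEMMAS AND PROOFS =====

-- a successful lookup pins both indices inside the bounds (for nonnegative indices)
theorem pvCellAt_some_bounds (field : List (List String)) (r c : Int) (v : String)
    (hr : 0 ≤ r) (hc : 0 ≤ c) (h : pvCellAt field r c = some v) :
    r < (field.length : Int) ∧ c < pvRowLen field r := by
  unfold pvCellAt at h
  unfold pvRowLen
  simp only [PySem.List.pyGet?_of_nonneg field hr] at h ⊢
  cases hrow : field[r.toNat]? with
  | none => simp [hrow] at h
  | some row =>
    rw [hrow] at h
    simp only [Option.bind_some] at h
    simp only [PySem.List.pyGet?_of_nonneg row hc] at h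
    have hrb := (List.getElem?_eq_some_iff.mp hrow).1
    have hcb := (List.getElem?_eq_some_iff.mp h).1
    simp only [Option.getD_some]
    omega

-- the score-table lookup at an in-bounds cell is scoreCell of that cell's content
theorem pvScoreAt_scoreTable (field : List (List String)) (house : Bool) (r c : Int) (ch : String)
    (hr : 0 ≤ r) (hc : 0 ≤ c) (hcell : pvCellAt field r c = some ch) :
    pvScoreAt (scoreTable field house) r c = scoreCell field house r c ch := by
  unfold pvCellAt at hcell
  unfold pvScoreAt scoreTable
  simp only [PySem.List.pyGet?_of_nonneg field hr] at hcell
  cases hrow : field[r.toNat]? with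
  | none => simp [hrow] at hcell
  | some row =>
    rw [hrow] at hcell
    simp only [Option.bind_some] at hcell
    have hrb : r.toNat < field.length := (List.getElem?_eq_some_iff.mp hrow).1
    simp only [PySem.List.pyGet?_of_nonneg row hc] at hcell
    have hcb : c.toNat < row.length := (List.getElem?_eq_some_iff.mp hcell).1
    have h1 : PySem.List.pyGet? ((PySem.List.enumerate field 0).map (fun rr =>
        (PySem.List.enumerate rr.2 0).map (fun cc => scoreCell field house rr.1 cc.1 cc.2))) r =
        some ((PySem.List.enumerate row 0).map (fun cc => scoreCell field house r cc.1 cc.2)) := by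
      rw [PySem.List.pyGet?_of_nonneg _ hr]
      rw [List.getElem?_map, PySem.List.getElem?_enumerate, hrow]
      simp [Int.toNat_of_nonneg hr]
    rw [h1]
    simp only [Option.getD_some]
    rw [PySem.List.pyGet?_of_nonneg _ hc]
    rw [List.getElem?_map, PySem.List.getElem?_enumerate, hcell]
    simp [Int.toNat_of_nonneg hc]

-- A's per-cell body equals B's per-cell body (with the precomputed table), for EVERY cell
theorem step_eq (field : List (List String)) (house : Bool) (r c cell g : Int) :
    availStep field house r c cell g = altStep field (scoreTable field house) r c cell g := by
  by_cases hb : r < 0 ∨ c < 0 ∨ (field.length : Int) ≤ r ∨ pvRowLen field r ≤ c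
  · unfold availStep altStep
    rw [if_pos hb]
    by_cases h1 : r < 0 ∨ c < 0
    · rw [if_pos h1]
    · rw [if_neg h1, if_pos (show (field.length : Int) ≤ r ∨ pvRowLen field r ≤ c by
        rcases hb with h | h | h | h
        · exact absurd (Or.inl h) h1
        · exact absurd (Or.inr h) h1
        · exact Or.inl h
        · exact Or.inr h)]
  · push_neg at hb
    obtain ⟨hr0, hc0, hrl, hcl⟩ := hb
    unfold availStep altStep
    rw [if_neg (show ¬(r < 0 ∨ c < 0) from by omega),
        if_neg (show ¬((field.length : Int) ≤ r ∨ pvRowLen field r ≤ c) from by omega),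
        if_neg (show ¬(r < 0 ∨ c < 0 ∨ (field.length : Int) ≤ r ∨ pvRowLen field r ≤ c) from by omega)]
    -- the cell exists: its content
    have hch : ∃ ch, pvCellAt field r c = some ch := by
      unfold pvCellAt
      rw [PySem.List.pyGet?_of_nonneg field hr0]
      have h1 : r.toNat < field.length := by omega
      rw [List.getElem?_eq_getElem h1]
      simp only [Option.bind_some]
      rw [PySem.List.pyGet?_of_nonneg _ hc0]
      have h2 : c.toNat < field[r.toNat].length := by
        unfold pvRowLen at hcl
        rw [PySem.List.pyGet?_of_nonneg field hr0, List.getElem?_eq_getElem h1] at hcl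
        simp only [Option.getD_some] at hcl
        omega
      exact ⟨_, List.getElem?_eq_getElem h2⟩
    obtain ⟨ch, hch⟩ := hch
    rw [pvScoreAt_scoreTable field house r c ch hr0 hc0 hch]
    unfold scoreCell
    by_cases hz : cell = 0
    · subst hz
      cases house <;> simp
    · simp only [ne_eq, hz, not_false_eq_true, true_and, if_true]
      by_cases hcol : pvCellAt field r c = some "#" ∨ pvCellAt field r c = some "H" ∨ pvCellAt field r c = some "G"
      · simp only [hcol, if_true]
      · simp only [hcol, if_false]
        have hX : pvCellAt field r c = some "X" ↔ ch = "X" := by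
          rw [hch]
          exact ⟨fun h => by injection h, fun h => by rw [h]⟩
        have hup : (0 ≤ r - 1 ∧ pvCellAt field (r - 1) c = some "H")
            ↔ (0 < r ∧ c < pvRowLen field (r - 1) ∧ pvCellAt field (r - 1) c = some "H") := by
          constructor
          · rintro ⟨h1, h5⟩
            exact ⟨by omega, (pvCellAt_some_bounds field (r - 1) c "H" h1 hc0 h5).2, h5⟩
          · rintro ⟨h1, _, h5⟩; exact ⟨by omega, h5⟩
        have hdn : (r + 1 < (field.length : Int) ∧ pvCellAt field (r + 1) c = some "H")
            ↔ (r + 1 < (field.length : Int) ∧ c < pvRowLen field (r + 1) ∧ pvCellAt field (r + 1) c = some "H") := by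
          constructor
          · rintro ⟨h1, h5⟩
            exact ⟨h1, (pvCellAt_some_bounds field (r + 1) c "H" (by omega) hc0 h5).2, h5⟩
          · rintro ⟨h1, _, h5⟩; exact ⟨h1, h5⟩
        have hlf : (0 ≤ c - 1 ∧ pvCellAt field r (c - 1) = some "H")
            ↔ (0 < c ∧ pvCellAt field r (c - 1) = some "H") := by
          constructor
          · rintro ⟨h1, h5⟩; exact ⟨by omega, h5⟩
          · rintro ⟨h1, h5⟩; exact ⟨by omega, h5⟩
        cases house with
        | false =>
          simp only [Bool.false_eq_true, if_false, hX, Option.some.injEq]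
          split_ifs <;> omega
        | true =>
          rw [if_pos rfl, if_pos rfl]
          simp only [hX, hup, hdn, hlf, Option.some.injEq]
          split_ifs <;> omega

-- ===== VERDICT (by name: the statement is the Claim_ definition above) =====
theorem available_spec : Claim_equal_available := by
  intro field shape H W house _ _
  unfold Spec_available available available_alt
  congr 1
  funext acc hw
  congr 1
  funext acc2 wc
  congr 1
  funext g
  exact step_eq field house (H + hw.1) (W + wc.1) wc.2 g
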